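-- pv_equiv track=rewrite | github.com/markjvillanueva3-cloud/PRISMV9 | archives/scripts_archived/swarm_ai_extraction.py | extract_module_at_line
-- ===== SOURCE A (Python) =====
-- def extract_module_at_line(lines, start_line, module_name):
--     """Extract complete module starting at line using brace matching"""
--     idx = start_line - 1
--     if idx >= len(lines):
--         return None, 0, 0
--
--     # Find opening brace
--     brace_count = 0
--     found_start = False
--     content_lines = []
--     actual_start = idx
--
--     for i in range(idx, min(idx + 2000, len(lines))):
--         line = lines[i]
--         content_lines.append(line)
--
--         brace_count += line.count('{') - line.count('}')
--
--         if not found_start and '{' in line: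
--             found_start = True
--             actual_start = i
--
--         if found_start and brace_count == 0:
--             return '\n'.join(content_lines), actual_start + 1, i + 1
--
--     return '\n'.join(content_lines[:500]), actual_start + 1, actual_start + 500
-- ===== SOURCE B (Python) =====
-- def extract_module_at_line(lines, start_line, module_name):
--     """Extract complete module starting at line using brace matching"""
--     idx = start_line - 1
--     if idx >= len(lines):
--         return None, 0, 0
--     window = lines[idx : idx + 2000]
--     # cumulative brace balance per window line
--     cum = []
--     bal = 0
--     for ln in window:
--         bal += ln.count('{') - ln.count('}')
--         cum.append(bal)
--     p = next((i for i, ln in enumerate(window) if '{' in ln), None)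
--     if p is not None:
--         q = next((i for i in range(p, len(window)) if cum[i] == 0), None)
--         if q is not None:
--             return '\n'.join(window[:q + 1]), idx + p + 1, idx + q + 1
--     actual_start = idx + p if p is not None else idx
--     return '\n'.join(window[:500]), actual_start + 1, actual_start + 500
-- ===== Notes on version B (the rewrite author's own statement) =====
-- stated objective: alternative
-- what changed: A's single stateful scan (brace_count/found_start/content accumulator with an early return) is replaced by slicing the 2000-line window once, building a cumulative brace-balance list, and two positional searches: the first line containing '{' and the first zero balance at or after it.
-- outside the precondition, e.g. on extract_module_at_line(['a{', '}'], 0, 'm'): A returns ('}\na{', 1, 1), B returns ('}', 0, 499)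
import Mathlib
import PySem

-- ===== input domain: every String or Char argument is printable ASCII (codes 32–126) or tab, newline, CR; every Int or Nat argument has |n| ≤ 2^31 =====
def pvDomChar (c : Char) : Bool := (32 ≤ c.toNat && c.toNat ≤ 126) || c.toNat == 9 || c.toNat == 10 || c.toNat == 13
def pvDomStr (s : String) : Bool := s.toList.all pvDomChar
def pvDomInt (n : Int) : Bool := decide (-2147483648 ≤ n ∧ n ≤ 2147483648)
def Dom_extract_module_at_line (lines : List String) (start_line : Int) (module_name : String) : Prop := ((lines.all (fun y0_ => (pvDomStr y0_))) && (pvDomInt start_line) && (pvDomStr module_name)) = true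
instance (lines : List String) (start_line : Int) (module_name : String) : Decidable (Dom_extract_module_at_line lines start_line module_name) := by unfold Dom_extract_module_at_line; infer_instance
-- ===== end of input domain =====

-- B replaces A's single stateful scan (4 loop variables, early return) by: slice the window once,
-- build the cumulative brace-balance list, then two positional searches (first '{' line, first zero
-- balance at or after it).  Objective: alternative decomposition; same asymptotic cost.

-- ===== PORT A =====
-- B differs from A by decomposition: A is one stateful scan, B slices the window once, builds a
-- cumulative brace-balance list and does two positional searches.  Objective: alternative; same cost.
def pvBal (line : String) : Int :=
  (PySem.Str.count line "{" : Int) - (PySem.Str.count line "}" : Int)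

def pvALoop (lines : List String) (is : List Int) (bc : Int) (found : Bool)
    (content : List String) (actual : Int) : Option String × Int × Int :=
  match is with
  | [] => (some (PySem.Str.join "\n" (content.take 500)), actual + 1, actual + 500)
  | i :: rest =>
    match PySem.List.pyGet? lines i with
    | none => (none, 0, 0)  -- IndexError (start_line below the negative-wrap range); outside Pre_
    | some line =>
      let content' := content ++ [line]
      let bc' := bc + pvBal line
      let fa := if (!found) && PySem.Str.isIn "{" line then (true, i) else (found, actual)
      if fa.1 && bc' == 0 then
        (some (PySem.Str.join "\n" content'), fa.2 + 1, i + 1)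
      else
        pvALoop lines rest bc' fa.1 content' fa.2

def extract_module_at_line (lines : List String) (start_line : Int) (module_name : String) :
    Option String × Int × Int :=
  let idx := start_line - 1
  if idx ≥ PySem.List.len lines then (none, 0, 0)
  else
    pvALoop lines (PySem.List.pyRange idx (min (idx + 2000) (PySem.List.len lines)) 1) 0 false [] idx

-- ===== PORT B =====
-- cumulative brace balance per window line (Source B's loop building `cum`)
def pvCum (w : List String) (bal : Int) : List Int :=
  match w with
  | [] => []
  | line :: w' =>
    let b := bal + ((PySem.Str.count line "{" : Int) - (PySem.Str.count line "}" : Int))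
    b :: pvCum w' b

-- p = next((i for i, ln in enumerate(window) if '{' in ln), None)
def pvFirstBrace (w : List String) : Option Nat :=
  match w with
  | [] => none
  | line :: w' => if PySem.Str.isIn "{" line then some 0 else (pvFirstBrace w').map (· + 1)

-- q = next((i for i in range(p, len(window)) if cum[i] == 0), None)
def pvFindZero (cum : List Int) (p : Nat) : Option Nat :=
  if h : p < cum.length then
    if cum[p] = 0 then some p else pvFindZero cum (p + 1)
  else none
termination_by cum.length - p

def extract_module_at_line_alt (lines : List String) (start_line : Int) (module_name : String) :
    Option String × Int × Int :=
  let idx := start_line - 1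
  if idx ≥ PySem.List.len lines then (none, 0, 0)
  else
    let window := PySem.List.slice lines (some idx) (some (idx + 2000))
    let cum := pvCum window 0
    match pvFirstBrace window with
    | some p =>
      match pvFindZero cum p with
      | some q => (some (PySem.Str.join "\n" (window.take (q + 1))), idx + (p : Int) + 1, idx + (q : Int) + 1)
      | none => (some (PySem.Str.join "\n" (window.take 500)), idx + (p : Int) + 1, idx + (p : Int) + 500)
    | none => (some (PySem.Str.join "\n" (window.take 500)), idx + 1, idx + 500)

-- ===== PRECONDITION & SPEC =====
-- Pre_ restricts to the natural domain of 1-based line numbers (start_line ≥ 1): for start_line ≤ 0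
-- Python's negative indices wrap around (or raise IndexError), an accident no caller relies on.
def Pre_extract_module_at_line (lines : List String) (start_line : Int) (module_name : String) : Prop :=
  1 ≤ start_line
instance (lines : List String) (start_line : Int) (module_name : String) :
    Decidable (Pre_extract_module_at_line lines start_line module_name) := by
  unfold Pre_extract_module_at_line; infer_instance

def pvWitness_extract_module_at_line : List String × Int × String :=
  (["module X {", "  a;", "}"], 1, "X")

def Spec_extract_module_at_line (lines : List String) (start_line : Int) (module_name : String)
    (out : Option String × Int × Int) : Prop :=
  out = extract_module_at_line_alt lines start_line module_name
instance (lines : List String) (start_line : Int) (module_name : String)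
    (out : Option String × Int × Int) :
    Decidable (Spec_extract_module_at_line lines start_line module_name out) := by
  unfold Spec_extract_module_at_line; infer_instance

-- ===== CLAIM =====
def Claim_equal_extract_module_at_line : Prop :=
  ∀ (lines : List String) (start_line : Int) (module_name : String),
    Dom_extract_module_at_line lines start_line module_name →
    Pre_extract_module_at_line lines start_line module_name →
    Spec_extract_module_at_line lines start_line module_name
      (extract_module_at_line lines start_line module_name)

-- ===== LEMMAS AND PROOFS =====

lemma pvFindZero_succ (x : Int) (cum : List Int) (p : Nat) :
    pvFindZero (x :: cum) (p + 1) = (pvFindZero cum p).map (· + 1) := by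
  fun_induction pvFindZero cum p with
  | case1 p hp hz =>
    rw [pvFindZero]; simp [hz, Nat.succ_lt_succ hp]
  | case2 p hp hz ih =>
    rw [pvFindZero, ih]; simp [hz, Nat.succ_lt_succ hp]
  | case3 p hp =>
    rw [pvFindZero]; simp; omega

lemma pvFindZero_zero_cons (x : Int) (cum : List Int) :
    pvFindZero (x :: cum) 0 = if x = 0 then some 0 else (pvFindZero cum 0).map (· + 1) := by
  rw [pvFindZero]
  simp [pvFindZero_succ]

lemma pvALoop_true (lines : List String) :
    ∀ (w : List String) (i : Int) (bc : Int) (c : List String) (a : Int),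
    (∀ j (hj : j < w.length), PySem.List.pyGet? lines (i + (j : Int)) = some w[j]) →
    pvALoop lines (PySem.List.pyRange i (i + (w.length : Int)) 1) bc true c a =
      match pvFindZero (pvCum w bc) 0 with
      | some q => (some (PySem.Str.join "\n" (c ++ w.take (q + 1))), a + 1, i + (q : Int) + 1)
      | none => (some (PySem.Str.join "\n" ((c ++ w).take 500)), a + 1, a + 500) := by
  intro w
  induction w with
  | nil =>
    intro i bc c a hw
    rw [show i + ((List.length ([] : List String) : Nat) : Int) = i by simp,
        PySem.List.pyRange_one_eq_nil (le_refl i)]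
    simp [pvALoop, pvCum, pvFindZero]
  | cons t w' ih =>
    intro i bc c a hw
    rw [PySem.List.pyRange_one_cons (by push_cast [List.length_cons]; omega)]
    have h0 := hw 0 (by simp)
    simp only [Int.natCast_zero, add_zero, List.getElem_cons_zero] at h0
    simp only [pvALoop, h0, Bool.not_true, Bool.false_and, Bool.false_eq_true, if_false,
      Bool.true_and]
    have hcum : pvCum (t :: w') bc = (bc + pvBal t) :: pvCum w' (bc + pvBal t) := by
      simp [pvCum, pvBal]
    rw [hcum, pvFindZero_zero_cons]
    by_cases hB : bc + pvBal t = 0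
    · rw [if_pos (by simpa using hB), if_pos hB]
      simp
    · rw [if_neg (by simpa using hB), if_neg hB]
      rw [show i + ((List.length (t :: w') : Nat) : Int) = (i + 1) + (w'.length : Int) by
        push_cast [List.length_cons]; try omega]
      rw [ih (i + 1) (bc + pvBal t) (c ++ [t]) a
        (by intro j hj
            have := hw (j + 1) (by simpa using Nat.succ_lt_succ hj)
            simpa [add_assoc, add_comm, add_left_comm] using this)]
      cases hq : pvFindZero (pvCum w' (bc + pvBal t)) 0 with
      | none => simp
      | some q' =>
        simp only [Option.map_some]
        simp [List.append_assoc, List.take_succ_cons]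
        omega

lemma pvALoop_false (lines : List String) :
    ∀ (w : List String) (i : Int) (bc : Int) (c : List String) (a : Int),
    (∀ j (hj : j < w.length), PySem.List.pyGet? lines (i + (j : Int)) = some w[j]) →
    pvALoop lines (PySem.List.pyRange i (i + (w.length : Int)) 1) bc false c a =
      match pvFirstBrace w with
      | some p =>
        match pvFindZero (pvCum w bc) p with
        | some q => (some (PySem.Str.join "\n" (c ++ w.take (q + 1))), i + (p : Int) + 1, i + (q : Int) + 1)
        | none => (some (PySem.Str.join "\n" ((c ++ w).take 500)), i + (p : Int) + 1, i + (p : Int) + 500)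
      | none => (some (PySem.Str.join "\n" ((c ++ w).take 500)), a + 1, a + 500) := by
  intro w
  induction w with
  | nil =>
    intro i bc c a hw
    rw [show i + ((List.length ([] : List String) : Nat) : Int) = i by simp,
        PySem.List.pyRange_one_eq_nil (le_refl i)]
    simp [pvALoop, pvFirstBrace]
  | cons t w' ih =>
    intro i bc c a hw
    rw [PySem.List.pyRange_one_cons (by push_cast [List.length_cons]; omega)]
    have h0 := hw 0 (by simp)
    simp only [Int.natCast_zero, add_zero, List.getElem_cons_zero] at h0
    have hcum : pvCum (t :: w') bc = (bc + pvBal t) :: pvCum w' (bc + pvBal t) := by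
      simp [pvCum, pvBal]
    have hshift : i + ((List.length (t :: w') : Nat) : Int) = (i + 1) + (w'.length : Int) := by
      push_cast [List.length_cons]; try omega
    have hw' : ∀ j (hj : j < w'.length), PySem.List.pyGet? lines ((i + 1) + (j : Int)) = some w'[j] := by
      intro j hj
      have := hw (j + 1) (by simpa using Nat.succ_lt_succ hj)
      simpa [add_assoc, add_comm, add_left_comm] using this
    by_cases hbr : PySem.Str.isIn "{" t = true
    · have htrue := pvALoop_true lines (t :: w') i bc c i hw
      rw [PySem.List.pyRange_one_cons (by push_cast [List.length_cons]; omega)] at htrue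
      simp only [pvALoop, h0, Bool.not_false, Bool.true_and, hbr, if_true,
        Bool.not_true, Bool.false_and, Bool.false_eq_true, if_false] at htrue ⊢
      rw [htrue, show pvFirstBrace (t :: w') = some 0 by
        simp only [pvFirstBrace, hbr, if_true]]
      cases hq : pvFindZero (pvCum (t :: w') bc) 0 with
      | none => simp [hq]
      | some q => simp [hq]
    · simp only [pvALoop, h0, Bool.not_false, Bool.true_and, hbr, if_false, Bool.false_and,
        Bool.false_eq_true, if_false]
      rw [hshift, ih (i + 1) (bc + pvBal t) (c ++ [t]) a hw']
      rw [show pvFirstBrace (t :: w') = (pvFirstBrace w').map (· + 1) by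
        simp only [pvFirstBrace]; rw [if_neg hbr]]
      cases hp : pvFirstBrace w' with
      | none => simp
      | some p' =>
        simp only [Option.map_some]
        rw [hcum, pvFindZero_succ]
        cases hq : pvFindZero (pvCum w' (bc + pvBal t)) p' with
        | none =>
          simp [List.append_assoc]
          omega
        | some q' =>
          simp only [Option.map_some]
          simp [List.append_assoc, List.take_succ_cons]
          omega

theorem main_eq (lines : List String) (start_line : Int) (module_name : String)
    (hpre : 1 ≤ start_line) :
    extract_module_at_line lines start_line module_name
      = extract_module_at_line_alt lines start_line module_name := by
  unfold extract_module_at_line extract_module_at_line_alt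
  simp only []
  split_ifs with hge
  · rfl
  · rw [ge_iff_le, not_le, PySem.List.len_eq] at hge
    set idx := start_line - 1 with hidx
    have h0 : 0 ≤ idx := by omega
    have hwin : PySem.List.slice lines (some idx) (some (idx + 2000))
        = (lines.drop idx.toNat).take 2000 := by
      rw [PySem.List.slice_toNat lines h0 (by omega)]
      congr 1
      omega
    set w := PySem.List.slice lines (some idx) (some (idx + 2000)) with hw0
    have hidxn : (idx.toNat : Int) = idx := Int.toNat_of_nonneg h0
    have hlenw : w.length = min 2000 (lines.length - idx.toNat) := by
      rw [show w = List.take 2000 (List.drop idx.toNat lines) from hwin]; simp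
    have hstop : min (idx + 2000) (PySem.List.len lines) = idx + (w.length : Int) := by
      rw [PySem.List.len_eq, hlenw]
      omega
    have hw : ∀ j (hj : j < w.length), PySem.List.pyGet? lines (idx + (j : Int)) = some w[j] := by
      intro j hj
      have hjn : idx.toNat + j < lines.length := by omega
      have hg : PySem.List.pyGet? lines (idx + (j : Int))
          = some (lines[(idx + (j : Int)).toNat]'(by omega)) :=
        PySem.List.pyGet?_eq_some_getElem lines (by omega) (by omega)
      rw [hg]
      have hjw : w[j] = lines[idx.toNat + j]'hjn := by
        have hj2 : j < ((lines.drop idx.toNat).take 2000).length := by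
          simpa [hwin] using hj
        calc w[j] = ((lines.drop idx.toNat).take 2000)[j]'hj2 := by
              congr 1
          _ = lines[idx.toNat + j]'hjn := by
              rw [List.getElem_take, List.getElem_drop]
      rw [hjw]
      have : (idx + (j : Int)).toNat = idx.toNat + j := by omega
      simp [this]
    rw [hstop, pvALoop_false lines w idx 0 [] idx hw]
    cases hp : pvFirstBrace w with
    | none => simp
    | some p =>
      cases hq : pvFindZero (pvCum w 0) p with
      | none => simp
      | some q => simp

-- ===== VERDICT =====
theorem extract_module_at_line_spec : Claim_equal_extract_module_at_line := by
  intro lines start_line module_name _hdom hpre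
  unfold Spec_extract_module_at_line
  exact main_eq lines start_line module_name hpre
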